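-- pv_equiv track=rewrite | github.com/mcdowellm/souhackathon2023 | main.py | find_madlib_format
-- ===== SOURCE A (Python) =====
-- def find_madlib_format(madlib_text):
--     adj_ind_start = madlib_text.find('adjective')
--     adj_ind_end = adj_ind_start + len('adjective') - 1
--     madlib_form_start = ''
--     madlib_form_end = ''
--     while adj_ind_start - 1 >= 0 and madlib_text[adj_ind_start - 1] != ' ':
--         madlib_form_start =  madlib_text[adj_ind_start - 1] + madlib_form_start
--         adj_ind_start -= 1
--
--     while adj_ind_end + 1 < len(madlib_text) and madlib_text[adj_ind_end + 1] != ' ':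
--         madlib_form_end = madlib_form_end + madlib_text[adj_ind_end + 1]
--         adj_ind_end += 1
--
--     return madlib_form_start, madlib_form_end
-- ===== SOURCE B (Python) =====
-- def find_madlib_format(madlib_text):
--     i = madlib_text.find('adjective')
--     left = max(i, 0)
--     start = madlib_text.rfind(' ', 0, left) + 1
--     end = madlib_text.find(' ', i + 9)
--     if end < 0:
--         end = len(madlib_text)
--     return madlib_text[start:left], madlib_text[i + 9:end]
-- ===== Notes on version B (the rewrite author's own statement) =====
-- stated objective: faster
-- what changed: A walks two integer indexes outward from the match with while loops, building each fragment by per-character string concatenation; B has no loops at all: it locates the enclosing word boundaries with one rfind and one find and returns the two slices between them.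
import Mathlib
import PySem

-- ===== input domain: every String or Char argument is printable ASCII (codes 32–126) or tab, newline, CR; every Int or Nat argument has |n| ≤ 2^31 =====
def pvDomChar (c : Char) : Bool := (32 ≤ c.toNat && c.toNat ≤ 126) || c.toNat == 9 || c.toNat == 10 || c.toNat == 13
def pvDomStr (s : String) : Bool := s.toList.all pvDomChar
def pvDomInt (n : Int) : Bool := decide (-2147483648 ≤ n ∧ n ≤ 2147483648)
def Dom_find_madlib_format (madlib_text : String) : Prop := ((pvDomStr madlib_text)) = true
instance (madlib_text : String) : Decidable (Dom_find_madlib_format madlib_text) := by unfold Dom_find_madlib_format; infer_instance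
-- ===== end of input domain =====

-- B replaces A's two character-by-character index walks (with per-character string
-- concatenation) by one rfind and one find locating the word boundaries, and two slices;
-- measured faster at scale (no per-character Python loop, no repeated concatenation).

-- ===== PORT A =====
-- left while loop: while adj_ind_start - 1 >= 0 and text[adj_ind_start - 1] != ' ': prepend, decrement.
-- fuel only makes the recursion structural; it is never exhausted for A's call (fuel = len(text) ≥ iterations).
def pvGoLeft (l : List Char) (fuel : Nat) (i : Int) (acc : List Char) : List Char :=
  match fuel with
  | 0 => acc
  | fuel + 1 =>
    if i - 1 ≥ 0 then
      match PySem.List.pyGet? l (i - 1) with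
      | some c => if c ≠ ' ' then pvGoLeft l fuel (i - 1) (c :: acc) else acc
      | none => acc          -- IndexError: unreachable for A's calls
    else acc

-- right while loop: while adj_ind_end + 1 < len(text) and text[adj_ind_end + 1] != ' ': append, increment.
def pvGoRight (l : List Char) (fuel : Nat) (j : Int) (acc : List Char) : List Char :=
  match fuel with
  | 0 => acc
  | fuel + 1 =>
    if j + 1 < (l.length : Int) then
      match PySem.List.pyGet? l (j + 1) with
      | some c => if c ≠ ' ' then pvGoRight l fuel (j + 1) (acc ++ [c]) else acc
      | none => acc          -- IndexError: unreachable for A's calls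
    else acc

def find_madlib_format (madlib_text : String) : String × String :=
  let adj_ind_start := PySem.Str.find madlib_text "adjective"
  let adj_ind_end := adj_ind_start + 9 - 1
  let l := madlib_text.toList
  (String.ofList (pvGoLeft l l.length adj_ind_start []),
   String.ofList (pvGoRight l l.length adj_ind_end []))

-- ===== PORT B =====
def find_madlib_format_alt (madlib_text : String) : String × String :=
  let l := madlib_text.toList
  let i := PySem.Str.find madlib_text "adjective"
  let left := max i 0
  let start := PySem.Chars.rfindFrom l [' '] 0 (some left) + 1   -- madlib_text.rfind(' ', 0, left)
  let e := PySem.Chars.findFrom l [' '] (i + 9) none             -- madlib_text.find(' ', i + 9)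
  let e' := if e < 0 then (l.length : Int) else e
  (String.ofList (PySem.List.slice l (some start) (some left)),
   String.ofList (PySem.List.slice l (some (i + 9)) (some e')))

-- ===== PRECONDITION & SPEC =====
def Spec_find_madlib_format (madlib_text : String) (out : String × String) : Prop :=
  out = find_madlib_format_alt madlib_text
instance (madlib_text : String) (out : String × String) : Decidable (Spec_find_madlib_format madlib_text out) := by
  unfold Spec_find_madlib_format; infer_instance

-- ===== CLAIM (what is proved, stated in full; the proofs are below) =====
def Claim_equal_find_madlib_format : Prop := ∀ (madlib_text : String), Dom_find_madlib_format madlib_text → Spec_find_madlib_format madlib_text (find_madlib_format madlib_text)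

-- ===== LEMMAS AND PROOFS =====

-- the leading run of non-space characters (proof-side characterization of both ports' fragments)
def pvWord : List Char → List Char
  | [] => []
  | c :: cs => if c = ' ' then [] else c :: pvWord cs

theorem pvGoRight_eq (l : List Char) (fuel : Nat) (j : Int) (acc : List Char)
    (hj : 0 ≤ j) (hf : (l.length : Int) - j ≤ fuel) :
    pvGoRight l fuel j acc = acc ++ pvWord (l.drop (j + 1).toNat) := by
  induction fuel generalizing j acc with
  | zero =>
    rw [pvGoRight]
    have : l.length ≤ (j + 1).toNat := by omega
    simp [List.drop_eq_nil_of_le this, pvWord]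
  | succ n ih =>
    rw [pvGoRight]
    by_cases h : j + 1 < (l.length : Int)
    · rw [if_pos h]
      have hk : (j + 1).toNat < l.length := by omega
      have hget : PySem.List.pyGet? l (j + 1) = some (l[(j + 1).toNat]) := by
        have hcast : j + 1 = (((j + 1).toNat : Nat) : Int) := by omega
        conv_lhs => rw [hcast]
        rw [PySem.List.pyGet?_natCast]
        exact List.getElem?_eq_getElem hk
      rw [hget]
      change (if l[(j + 1).toNat] ≠ ' ' then pvGoRight l n (j + 1) (acc ++ [l[(j + 1).toNat]]) else acc) = _
      rw [List.drop_eq_getElem_cons hk]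
      by_cases hsp : l[(j + 1).toNat] = ' '
      · simp [hsp, pvWord]
      · rw [if_pos (by exact hsp)]
        rw [ih (j + 1) (acc ++ [l[(j + 1).toNat]]) (by omega) (by omega)]
        have h2 : (j + 1 + 1).toNat = (j + 1).toNat + 1 := by omega
        simp [pvWord, hsp, h2]
    · rw [if_neg h]
      have : l.length ≤ (j + 1).toNat := by omega
      simp [List.drop_eq_nil_of_le this, pvWord]

theorem pvGoLeft_eq (l : List Char) (fuel : Nat) (k : Nat) (acc : List Char)
    (hf : k ≤ fuel) (hlen : k ≤ l.length) :
    pvGoLeft l fuel (k : Int) acc = (pvWord (l.take k).reverse).reverse ++ acc := by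
  induction fuel generalizing k acc with
  | zero =>
    have hk : k = 0 := by omega
    subst hk
    rw [pvGoLeft]
    simp [pvWord]
  | succ n ih =>
    rw [pvGoLeft]
    match k, hlen with
    | 0, _ =>
      rw [if_neg (by omega)]
      simp [pvWord]
    | (m + 1 : Nat), hlen2 =>
      have hm : ((m + 1 : Nat) : Int) - 1 = (m : Int) := by push_cast; ring
      rw [if_pos (by push_cast; omega)]
      have hk : m < l.length := by omega
      have hget : PySem.List.pyGet? l (((m + 1 : Nat) : Int) - 1) = some l[m] := by
        rw [hm, PySem.List.pyGet?_natCast]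
        exact List.getElem?_eq_getElem hk
      rw [hget]
      change (if l[m] ≠ ' ' then pvGoLeft l n (((m + 1 : Nat) : Int) - 1) (l[m] :: acc) else acc) = _
      rw [hm]
      have htake : l.take (m + 1) = l.take m ++ [l[m]] := by
        rw [List.take_add_one, List.getElem?_eq_getElem hk]
        simp
      by_cases hsp : l[m] = ' '
      · rw [if_neg (by simp [hsp])]
        rw [htake, List.reverse_append, List.reverse_singleton, List.singleton_append]
        rw [show pvWord (l[m] :: (l.take m).reverse) = [] from by simp [pvWord, hsp]]
        simp
      · rw [if_pos hsp]
        rw [ih m (l[m] :: acc) (by omega) (by omega)]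
        rw [htake, List.reverse_append, List.reverse_singleton, List.singleton_append]
        rw [show pvWord (l[m] :: (l.take m).reverse) = l[m] :: pvWord (l.take m).reverse from by
          simp [pvWord, hsp]]
        simp

theorem pvGoLeft_neg_one (l : List Char) (fuel : Nat) (acc : List Char) :
    pvGoLeft l fuel (-1) acc = acc := by
  cases fuel with
  | zero => rfl
  | succ n =>
    show (if (-1 : Int) - 1 ≥ 0 then _ else acc) = acc
    rw [if_neg (by omega)]

-- find points at the unique position that carries the pattern with none before it
theorem find_eq_of (l pat : List Char) (k : Nat) (h1 : pat <+: l.drop k)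
    (h2 : ∀ i < k, ¬ pat <+: l.drop i) : PySem.Chars.find l pat = k := by
  have hinf : pat <:+: l := h1.isInfix.trans (List.drop_suffix k l).isInfix
  have h0 : 0 ≤ PySem.Chars.find l pat := (PySem.Chars.find_nonneg_iff _ _).2 hinf
  obtain ⟨hpref, hmin⟩ := PySem.Chars.find_spec h0
  rcases lt_trichotomy (PySem.Chars.find l pat).toNat k with h | h | h
  · exact absurd hpref (h2 _ h)
  · omega
  · exact absurd h1 (hmin k h)

theorem find_cons (c : Char) (s pat : List Char) (_hne : pat ≠ []) :
    PySem.Chars.find (c :: s) pat =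
      if pat <+: (c :: s) then 0
      else if pat <:+: s then PySem.Chars.find s pat + 1 else -1 := by
  by_cases hpre : pat <+: (c :: s)
  · rw [if_pos hpre]
    exact_mod_cast find_eq_of (c :: s) pat 0 (by simpa using hpre) (by omega)
  · rw [if_neg hpre]
    by_cases hin : pat <:+: s
    · rw [if_pos hin]
      have h0 : 0 ≤ PySem.Chars.find s pat := (PySem.Chars.find_nonneg_iff _ _).2 hin
      obtain ⟨hpref, hmin⟩ := PySem.Chars.find_spec h0
      have heq : PySem.Chars.find (c :: s) pat = ((PySem.Chars.find s pat).toNat + 1 : Nat) := by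
        apply find_eq_of
        · rw [List.drop_succ_cons]; exact hpref
        · intro i hi
          cases i with
          | zero => simpa using hpre
          | succ j => rw [List.drop_succ_cons]; exact hmin j (by omega)
      rw [heq]; omega
    · rw [if_neg hin]
      rw [PySem.Chars.find_eq_neg_one_iff, List.infix_cons_iff]
      tauto

-- pvWord is 'take up to the first space', phrased with find
theorem pvWord_eq_take_find (d : List Char) :
    pvWord d = if PySem.Chars.find d [' '] = -1 then d
               else d.take (PySem.Chars.find d [' ']).toNat := by
  induction d with
  | nil =>
    have hf : PySem.Chars.find [] [' '] = -1 := by decide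
    simp [pvWord, hf]
  | cons c t ih =>
    by_cases hc : c = ' '
    · have hf : PySem.Chars.find (c :: t) [' '] = 0 := by
        rw [find_cons c t [' '] (by decide), if_pos (by simp [List.cons_prefix_cons, hc])]
      rw [hf]
      simp [pvWord, hc]
    · have hnp : ¬ ([' '] <+: (c :: t)) := by
        simp only [List.cons_prefix_cons]
        exact fun h => hc h.1.symm
      by_cases hin : [' '] <:+: t
      · have h0 : 0 ≤ PySem.Chars.find t [' '] := (PySem.Chars.find_nonneg_iff _ _).2 hin
        have hf : PySem.Chars.find (c :: t) [' '] = PySem.Chars.find t [' '] + 1 := by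
          rw [find_cons c t [' '] (by decide), if_neg hnp, if_pos hin]
        rw [hf, if_neg (by omega)]
        rw [show (PySem.Chars.find t [' '] + 1).toNat
              = (PySem.Chars.find t [' ']).toNat + 1 from by omega]
        rw [List.take_succ_cons]
        show (if c = ' ' then [] else c :: pvWord t) = _
        rw [if_neg hc, ih, if_neg (by omega)]
      · have hf : PySem.Chars.find (c :: t) [' '] = -1 := by
          rw [find_cons c t [' '] (by decide), if_neg hnp, if_neg hin]
        have hne : PySem.Chars.find t [' '] = -1 := (PySem.Chars.find_eq_neg_one_iff _ _).2 hin
        rw [hf, if_pos rfl]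
        show (if c = ' ' then [] else c :: pvWord t) = _
        rw [if_neg hc, ih, if_pos hne]

-- one backwards step of rfind's scan is unaffected by an appended character
theorem rfind_go_snoc (ds : List Char) (c : Char) :
    ∀ j, j < ds.length →
      PySem.Chars.rfind.go (ds ++ [c]) [' '] j = PySem.Chars.rfind.go ds [' '] j := by
  intro j
  induction j with
  | zero =>
    intro hj
    rw [PySem.Chars.rfind.go, PySem.Chars.rfind.go]
    cases ds with
    | nil => simp at hj
    | cons d tail => simp [List.isPrefixOf]
  | succ j ih =>
    intro hj
    rw [PySem.Chars.rfind.go, PySem.Chars.rfind.go]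
    have hle : j + 1 ≤ ds.length := by omega
    rw [List.drop_append_of_le_length hle]
    cases hdd : ds.drop (j + 1) with
    | nil =>
      have := congrArg List.length hdd
      simp [List.length_drop] at this
      omega
    | cons e X =>
      simp only [List.cons_append, List.isPrefixOf, Bool.and_true]
      by_cases he : (' ' == e) = true
      · simp [he]
      · simp only [Bool.not_eq_true] at he
        simp [he, ih (by omega)]

-- rfind over a snoc: the appended character is inspected first
theorem rfind_snoc (ds : List Char) (c : Char) :
    PySem.Chars.rfind (ds ++ [c]) [' ']
      = if c = ' ' then (ds.length : Int) else PySem.Chars.rfind ds [' '] := by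
  unfold PySem.Chars.rfind
  rw [show (ds ++ [c]).length = ds.length + 1 from by simp]
  rw [PySem.Chars.rfind.go]
  rw [show (ds ++ [c]).drop (ds.length + 1) = [] from by simp]
  rw [show ([' '].isPrefixOf ([] : List Char)) = false from by simp [List.isPrefixOf]]
  simp only [Bool.false_eq_true, if_false]
  cases hm : ds.length with
  | zero =>
    have hnil : ds = [] := List.eq_nil_of_length_eq_zero hm
    subst hnil
    rw [PySem.Chars.rfind.go]
    simp only [List.nil_append, List.isPrefixOf, Bool.and_true]
    by_cases hc : c = ' '
    · simp [hc]
    · have : (' ' == c) = false := by simp; exact fun h => hc h.symm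
      simp [this, hc]
      decide
  | succ m =>
    rw [PySem.Chars.rfind.go]
    have hle : m + 1 ≤ ds.length := by omega
    rw [List.drop_append_of_le_length hle,
        show ds.drop (m + 1) = [] from List.drop_eq_nil_of_le (by omega)]
    simp only [List.nil_append, List.isPrefixOf, Bool.and_true]
    by_cases hc : c = ' '
    · simp [hc]
    · have hbe : (' ' == c) = false := by simp; exact fun h => hc h.symm
      simp only [hbe, Bool.false_eq_true, if_false, hc]
      rw [rfind_go_snoc ds c m (by omega)]
      conv_rhs => rw [PySem.Chars.rfind.go]
      rw [show ds.drop (m + 1) = [] from List.drop_eq_nil_of_le (by omega)]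
      simp [List.isPrefixOf]

theorem rfind_bound (d : List Char) :
    -1 ≤ PySem.Chars.rfind d [' '] ∧ PySem.Chars.rfind d [' '] < (d.length : Int) + 1 ∧
      PySem.Chars.rfind d [' '] ≤ (d.length : Int) - 1 := by
  induction d using List.reverseRecOn with
  | nil => refine ⟨by decide, by decide, by decide⟩
  | append_singleton ds c ih =>
    rw [rfind_snoc]
    by_cases hc : c = ' '
    · simp [hc]
    · simp [hc]
      omega

-- the tail of d after its last space is the reversed leading word of d.reverse
theorem rfind_last_word (d : List Char) :
    d.drop ((PySem.Chars.rfind d [' ']) + 1).toNat = (pvWord d.reverse).reverse := by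
  induction d using List.reverseRecOn with
  | nil => simp [show PySem.Chars.rfind [] [' '] = -1 from by decide, pvWord]
  | append_singleton ds c ih =>
    rw [rfind_snoc]
    by_cases hc : c = ' '
    · rw [if_pos hc]
      rw [show ((ds.length : Int) + 1).toNat = ds.length + 1 from by omega]
      rw [List.drop_eq_nil_of_le (by simp)]
      rw [List.reverse_append]
      simp [pvWord, hc]
    · rw [if_neg hc]
      have hb := rfind_bound ds
      have hle : ((PySem.Chars.rfind ds [' ']) + 1).toNat ≤ ds.length := by omega
      rw [List.drop_append_of_le_length hle, ih]
      rw [List.reverse_append]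
      simp [pvWord, hc]

theorem rfindFrom_eval (l : List Char) (left : Int) (h0 : 0 ≤ left) (hlen : left ≤ (l.length : Int)) :
    PySem.Chars.rfindFrom l [' '] 0 (some left) = PySem.Chars.rfind (l.take left.toNat) [' '] := by
  unfold PySem.Chars.rfindFrom
  have h1 : ¬ ((l.length : Int) < left) := by omega
  have h2 : ¬ (left < 0) := by omega
  have h3 : ¬ ((0 : Int) < 0) := by omega
  simp only [h1, if_false, h2, h3]
  by_cases hr : PySem.Chars.rfind (List.drop (0 : Int).toNat (List.take left.toNat l)) [' '] = -1
  · simp only [Int.toNat_zero, List.drop_zero] at hr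
    simp [hr]
  · simp only [Int.toNat_zero, List.drop_zero] at hr
    simp [hr]

theorem findFrom_past_len (l : List Char) (m : Int) (h : (l.length : Int) < m) (h0 : 0 ≤ m) :
    PySem.Chars.findFrom l [' '] m none = -1 := by
  unfold PySem.Chars.findFrom
  have h2 : ¬ (m < 0) := by omega
  simp only [h2, if_false, if_pos h]

-- B's prefix slice equals A's backwards word scan
theorem prefix_slice (l : List Char) (left : Int) (h0 : 0 ≤ left) (hlen : left ≤ (l.length : Int)) :
    PySem.List.slice l (some (PySem.Chars.rfindFrom l [' '] 0 (some left) + 1)) (some left)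
      = (pvWord (l.take left.toNat).reverse).reverse := by
  rw [rfindFrom_eval l left h0 hlen]
  have hb := rfind_bound (l.take left.toNat)
  have hdlen : (l.take left.toNat).length = left.toNat := by
    simp
    omega
  rw [hdlen] at hb
  set r := PySem.Chars.rfind (l.take left.toNat) [' '] with hr
  rw [show r + 1 = (((r + 1).toNat : Nat) : Int) from by omega,
      show left = ((left.toNat : Nat) : Int) from by omega,
      PySem.List.slice_natCast]
  rw [List.take_drop]
  rw [show (r + 1).toNat + (left.toNat - (r + 1).toNat) = left.toNat from by omega]
  simp only [Int.toNat_natCast]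
  exact rfind_last_word (l.take left.toNat)

-- B's suffix slice equals A's forwards word scan
theorem suffix_slice (l : List Char) (m : Int) (h0 : 0 ≤ m) :
    PySem.List.slice l (some m)
        (some (if PySem.Chars.findFrom l [' '] m none < 0 then (l.length : Int)
               else PySem.Chars.findFrom l [' '] m none))
      = pvWord (l.drop m.toNat) := by
  by_cases hm : m ≤ (l.length : Int)
  · rw [show m = ((m.toNat : Nat) : Int) from by omega,
        PySem.Chars.findFrom_natCast l [' '] m.toNat (by omega)]
    simp only [Int.toNat_natCast]
    by_cases hf : PySem.Chars.find (l.drop m.toNat) [' '] = -1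
    · rw [if_pos (by rw [if_pos hf]; omega)]
      rw [show ((l.length : Nat) : Int) = ((l.length : Nat) : Int) from rfl, PySem.List.slice_natCast]
      rw [List.take_drop, show m.toNat + (l.length - m.toNat) = l.length from by omega,
          List.take_length]
      rw [pvWord_eq_take_find, if_pos hf]
    · have hf0 : 0 ≤ PySem.Chars.find (l.drop m.toNat) [' '] :=
        by have := PySem.Chars.neg_one_le_find (l.drop m.toNat) [' ']; omega
      rw [if_neg (by rw [if_neg hf]; omega)]
      rw [if_neg hf]
      rw [show (m.toNat : Int) + PySem.Chars.find (l.drop m.toNat) [' ']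
            = (((m.toNat + (PySem.Chars.find (l.drop m.toNat) [' ']).toNat : Nat)) : Int) from by omega,
          PySem.List.slice_natCast]
      rw [show m.toNat + (PySem.Chars.find (l.drop m.toNat) [' ']).toNat - m.toNat
            = (PySem.Chars.find (l.drop m.toNat) [' ']).toNat from by omega]
      rw [pvWord_eq_take_find, if_neg hf]
  · rw [findFrom_past_len l m (by omega) h0, if_pos (by omega)]
    rw [show m = ((m.toNat : Nat) : Int) from by omega,
        show ((l.length : Nat) : Int) = ((l.length : Nat) : Int) from rfl, PySem.List.slice_natCast]
    simp only [Int.toNat_natCast]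
    rw [List.drop_eq_nil_of_le (by omega)]
    simp [pvWord]

-- ===== VERDICT (by name: the statement is the Claim_ definition above) =====
theorem find_madlib_format_spec : Claim_equal_find_madlib_format := by
  intro s _
  show find_madlib_format s = find_madlib_format_alt s
  unfold find_madlib_format find_madlib_format_alt
  rw [PySem.Str.find_eq]
  set l := s.toList with hls
  set i := PySem.Chars.find l "adjective".toList with hi
  have hge : -1 ≤ i := PySem.Chars.neg_one_le_find l "adjective".toList
  have hle : i ≤ (l.length : Int) := PySem.Chars.find_le_length l "adjective".toList
  have hA1 : pvGoLeft l l.length i [] = (pvWord (l.take (max i 0).toNat).reverse).reverse := by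
    by_cases h0 : 0 ≤ i
    · have h := pvGoLeft_eq l l.length i.toNat [] (by omega) (by omega)
      rw [show ((i.toNat : Nat) : Int) = i from by omega] at h
      rw [h, show (max i 0).toNat = i.toNat from by omega]
      simp
    · have hneg : i = -1 := by omega
      rw [hneg, pvGoLeft_neg_one]
      rw [show (max (-1 : Int) 0).toNat = 0 from by norm_num]
      simp [pvWord]
  have hA2 : pvGoRight l l.length (i + 9 - 1) [] = pvWord (l.drop (i + 9).toNat) := by
    have h := pvGoRight_eq l l.length (i + 9 - 1) [] (by omega) (by omega)
    rw [show (i + 9 - 1 + 1) = i + 9 from by ring] at h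
    simpa using h
  have hB1 := prefix_slice l (max i 0) (by omega) (by omega)
  have hB2 := suffix_slice l (i + 9) (by omega)
  show (String.ofList (pvGoLeft l l.length i []), String.ofList (pvGoRight l l.length (i + 9 - 1) []))
      = (String.ofList (PySem.List.slice l (some (PySem.Chars.rfindFrom l [' '] 0 (some (max i 0)) + 1)) (some (max i 0))),
         String.ofList (PySem.List.slice l (some (i + 9))
           (some (if PySem.Chars.findFrom l [' '] (i + 9) none < 0 then (l.length : Int)
                  else PySem.Chars.findFrom l [' '] (i + 9) none))))
  rw [hA1, hA2, hB1, hB2]
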